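-- pv_equiv track=rewrite | github.com/AnnaGrishkova/Python-self-education | task7_.py | time_to_boil
-- ===== SOURCE A (Python) =====
-- def time_to_boil(start_temp):
--     boiling_temp = 100
--     temp = start_temp
--     time = 0
--
--     while temp < boiling_temp:
--         temp += 1
--         time += 2
--
--     return time
-- ===== SOURCE B (Python) =====
-- def time_to_boil(start_temp):
--     return 2 * max(0, 100 - start_temp)
-- ===== Notes on version B (the rewrite author's own statement) =====
-- stated objective: simpler
-- what changed: Replaced the degree-by-degree counting while-loop with a direct closed-form arithmetic expression.
import Mathlib
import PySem

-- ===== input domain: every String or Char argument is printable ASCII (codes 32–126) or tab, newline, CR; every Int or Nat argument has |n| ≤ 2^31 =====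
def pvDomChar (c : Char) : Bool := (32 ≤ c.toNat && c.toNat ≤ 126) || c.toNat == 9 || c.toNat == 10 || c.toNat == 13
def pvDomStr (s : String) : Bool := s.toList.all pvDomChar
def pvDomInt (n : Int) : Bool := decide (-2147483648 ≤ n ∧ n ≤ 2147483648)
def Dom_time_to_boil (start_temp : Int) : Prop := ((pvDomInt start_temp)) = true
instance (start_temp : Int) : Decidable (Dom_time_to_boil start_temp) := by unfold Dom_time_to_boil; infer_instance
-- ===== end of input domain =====

-- B replaces A's degree-by-degree while loop with a closed-form arithmetic expression (objective: simpler; constant-time, though too fast to time-compare).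


-- ===== PORT A =====
-- the 'while temp < boiling_temp' loop, carrying (temp, time) exactly as A does
def time_to_boil_loop (temp : Int) (time : Int) : Int :=
  if temp < 100 then time_to_boil_loop (temp + 1) (time + 2) else time
termination_by (100 - temp).toNat
decreasing_by omega

def time_to_boil (start_temp : Int) : Int :=
  time_to_boil_loop start_temp 0

-- ===== PORT B =====
def time_to_boil_alt (start_temp : Int) : Int :=
  2 * max 0 (100 - start_temp)

-- ===== PRECONDITION & SPEC =====
def Spec_time_to_boil (start_temp : Int) (out : Int) : Prop := out = time_to_boil_alt start_temp
instance (start_temp : Int) (out : Int) : Decidable (Spec_time_to_boil start_temp out) := by unfold Spec_time_to_boil; infer_instance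

-- ===== CLAIM (what is proved, stated in full; the proofs are below) =====
def Claim_equal_time_to_boil : Prop := ∀ (start_temp : Int), Dom_time_to_boil start_temp → Spec_time_to_boil start_temp (time_to_boil start_temp)

-- ===== LEMMAS AND PROOFS =====
theorem time_to_boil_loop_eq (temp time : Int) :
    time_to_boil_loop temp time = time + 2 * max 0 (100 - temp) := by
  induction temp, time using time_to_boil_loop.induct with
  | case1 temp time h ih =>
      rw [time_to_boil_loop, if_pos h, ih]; omega
  | case2 temp time h =>
      rw [time_to_boil_loop, if_neg h]; omega

-- ===== VERDICT (by name: the statement is the Claim_ definition above) =====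
theorem time_to_boil_spec : Claim_equal_time_to_boil := by
  intro s _
  unfold Spec_time_to_boil time_to_boil time_to_boil_alt
  rw [time_to_boil_loop_eq]; omega
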